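-- pv_equiv track=rewrite | github.com/ozlabsai/gatling | source/dataset/loaders.py | _infer_sensitivity
-- ===== SOURCE A (Python) =====
-- def _infer_sensitivity(prompt: str, config: str) -> int:
--     """
--     Infer data sensitivity level (1-5) from prompt and config.
--
--     Sensitivity scale:
--         1 = Public (open data)
--         2 = Internal (company data)
--         3 = Confidential (private user data)
--         4 = Restricted (financial, health)
--         5 = Critical (passwords, keys)
--     """
--     prompt_lower = prompt.lower()
--
--     # Check for high-sensitivity keywords
--     if any(
--         keyword in prompt_lower
--         for keyword in ["password", "credential", "secret", "key", "token"]
--     ):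
--         return 5
--     elif any(
--         keyword in prompt_lower
--         for keyword in ["financial", "payment", "credit card", "bank", "health"]
--     ):
--         return 4
--     elif any(
--         keyword in prompt_lower
--         for keyword in ["personal", "private", "email", "phone", "address"]
--     ):
--         return 3
--     elif config == "harmful":
--         return 2  # Harmful scenarios default to higher sensitivity
--     else:
--         return 1
-- ===== SOURCE B (Python) =====
-- _GROUPS = [
--     (3, ["personal", "private", "email", "phone", "address"]),
--     (5, ["password", "credential", "secret", "key", "token"]),
--     (4, ["financial", "payment", "credit card", "bank", "health"]),
-- ]
--
--
-- def _infer_sensitivity(prompt: str, config: str) -> int: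
--     prompt_lower = prompt.lower()
--     matched = [
--         level
--         for level, keywords in _GROUPS
--         if any(keyword in prompt_lower for keyword in keywords)
--     ]
--     if matched:
--         return max(matched)
--     return 2 if config == "harmful" else 1
-- ===== Notes on version B (the rewrite author's own statement) =====
-- stated objective: alternative
-- what changed: Replaces the ordered if/elif priority chain by a table of (level, keywords) groups scanned in a non-priority order, collecting every matching level and aggregating with max; the fallback (2 for 'harmful', else 1) fires only when no group matched.
import Mathlib
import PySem

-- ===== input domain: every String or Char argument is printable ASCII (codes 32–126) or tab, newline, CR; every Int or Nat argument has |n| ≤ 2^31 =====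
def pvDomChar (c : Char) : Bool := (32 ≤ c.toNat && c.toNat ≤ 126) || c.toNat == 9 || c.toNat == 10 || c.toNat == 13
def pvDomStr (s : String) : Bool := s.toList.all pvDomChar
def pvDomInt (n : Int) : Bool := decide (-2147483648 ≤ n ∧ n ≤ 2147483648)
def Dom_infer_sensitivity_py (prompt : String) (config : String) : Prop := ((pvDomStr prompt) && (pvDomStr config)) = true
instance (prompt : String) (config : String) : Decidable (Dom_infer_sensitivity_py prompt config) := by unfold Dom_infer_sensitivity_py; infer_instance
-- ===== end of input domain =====

-- B replaces A's ordered if/elif chain by a (level, keywords) table scanned in a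
-- non-priority order, aggregating all matched levels with max (objective: alternative).

-- ===== PORT A =====
def infer_sensitivity_py (prompt : String) (config : String) : Int :=
  let prompt_lower := PySem.Str.lower prompt
  if (["password", "credential", "secret", "key", "token"].any
      (fun keyword => PySem.Str.isIn keyword prompt_lower)) then 5
  else if (["financial", "payment", "credit card", "bank", "health"].any
      (fun keyword => PySem.Str.isIn keyword prompt_lower)) then 4
  else if (["personal", "private", "email", "phone", "address"].any
      (fun keyword => PySem.Str.isIn keyword prompt_lower)) then 3
  else if config == "harmful" then 2
  else 1

-- ===== PORT B =====
def pvGroups : List (Int × List String) :=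
  [(3, ["personal", "private", "email", "phone", "address"]),
   (5, ["password", "credential", "secret", "key", "token"]),
   (4, ["financial", "payment", "credit card", "bank", "health"])]

def infer_sensitivity_py_alt (prompt : String) (config : String) : Int :=
  let prompt_lower := PySem.Str.lower prompt
  let matched := (pvGroups.filter
      (fun g => g.2.any (fun keyword => PySem.Str.isIn keyword prompt_lower))).map (·.1)
  match PySem.List.max? matched (fun x => x) with
  | some m => m
  | none => if config == "harmful" then 2 else 1

-- ===== PRECONDITION & SPEC =====
def Spec_infer_sensitivity_py (prompt : String) (config : String) (out : Int) : Prop := out = infer_sensitivity_py_alt prompt config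
instance (prompt : String) (config : String) (out : Int) : Decidable (Spec_infer_sensitivity_py prompt config out) := by unfold Spec_infer_sensitivity_py; infer_instance

-- ===== CLAIM (what is proved, stated in full; the proofs are below) =====
def Claim_equal_infer_sensitivity_py : Prop := ∀ (prompt : String) (config : String), Dom_infer_sensitivity_py prompt config → Spec_infer_sensitivity_py prompt config (infer_sensitivity_py prompt config)

-- ===== LEMMAS AND PROOFS =====

-- ===== VERDICT (by name: the statement is the Claim_ definition above) =====
theorem infer_sensitivity_py_spec : Claim_equal_infer_sensitivity_py := by
  intro prompt config _
  unfold Spec_infer_sensitivity_py infer_sensitivity_py infer_sensitivity_py_alt pvGroups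
  set pl := PySem.Str.lower prompt with hpl
  set b5 := (["password", "credential", "secret", "key", "token"].any
      (fun keyword => PySem.Str.isIn keyword pl)) with hb5
  set b4 := (["financial", "payment", "credit card", "bank", "health"].any
      (fun keyword => PySem.Str.isIn keyword pl)) with hb4
  set b3 := (["personal", "private", "email", "phone", "address"].any
      (fun keyword => PySem.Str.isIn keyword pl)) with hb3
  rcases b5 <;> rcases b4 <;> rcases b3 <;>
    simp only [List.filter_cons, List.filter_nil, ← hb5, ← hb4, ← hb3, Bool.false_eq_true,
      if_true, if_false, List.map_cons, List.map_nil, PySem.List.max?] <;> rfl
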